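-- pv_equiv track=rewrite | github.com/WU-BIMAC/W-IDM_OmeroImporterExcelHelperPy | walk_filesystem.py | truncate_name
-- ===== SOURCE A (Python) =====
-- MAX_NAME = 255
--
-- def truncate_name(dirs, max=MAX_NAME):
--     """Construct new file name from the end to the front until it exceeds MAX_NAME.
--
--      Args:
--         dirs: list of directory names ["tag1", "tag2", ..., "tagN", file].
--         max: integer maximum length for file name.
--      Returns:
--         String: file name shorter than MAX_NAME
--     """
--     new_filename = "\\".join(dirs)
--     length = len(new_filename)
--     num_split = 1
--     while length > max:
--         # split off front num_split directories
--         split = new_filename.split("\\", num_split)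
--         length = len(split[-1])
--         num_split += 1
--     new_filename = split[-1]
--     return new_filename
-- ===== SOURCE B (Python) =====
-- MAX_NAME = 255
--
-- def truncate_name(dirs, max=MAX_NAME):
--     """Split the joined name once and scan suffix lengths from the back,
--     instead of re-splitting the whole string once per dropped component."""
--     parts = "\\".join(dirs).split("\\")
--     total = sum(len(p) for p in parts) + len(parts) - 1
--     if total <= max:
--         return "\\".join(parts)
--     length = len(parts[-1])
--     k = len(parts) - 1
--     while k > 1 and length + 1 + len(parts[k - 1]) <= max:
--         k -= 1
--         length += 1 + len(parts[k])
--     return "\\".join(parts[k:])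
-- ===== Notes on version B (the rewrite author's own statement) =====
-- stated objective: faster
-- what changed: B splits the joined name once and finds the shortest dropped prefix by one backward scan accumulating suffix lengths, instead of A's loop that re-splits the whole string with a growing maxsplit on every iteration.
import Mathlib
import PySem

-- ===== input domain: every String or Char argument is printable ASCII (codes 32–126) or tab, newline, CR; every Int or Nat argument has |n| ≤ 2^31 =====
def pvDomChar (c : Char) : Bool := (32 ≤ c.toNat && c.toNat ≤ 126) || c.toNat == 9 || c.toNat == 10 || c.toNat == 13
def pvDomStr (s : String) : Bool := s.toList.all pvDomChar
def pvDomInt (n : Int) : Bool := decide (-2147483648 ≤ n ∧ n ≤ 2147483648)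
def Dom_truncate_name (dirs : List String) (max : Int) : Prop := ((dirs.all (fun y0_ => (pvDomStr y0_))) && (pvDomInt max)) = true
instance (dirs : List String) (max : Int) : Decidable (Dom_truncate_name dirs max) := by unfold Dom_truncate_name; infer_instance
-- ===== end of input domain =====

-- B replaces A's re-split-per-iteration loop by one split and one backward scan of
-- accumulated suffix sizes (objective: faster).

-- ===== PORT A =====
-- A's while-loop re-splits with num_split = 1, 2, …; the split result stabilises once
-- num_split reaches the number of separators, so that count + 1 is enough fuel: under
-- Pre_ the loop returns before the fuel runs out (otherwise the Python loop diverges).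
def truncA_loop (s : String) (max : Int) : Nat → Nat → String
  | _, 0 => ""   -- fuel exhausted: Python's loop diverges here; outside Pre_
  | num_split, fuel+1 =>
      let split := (PySem.Str.splitMax? s "\\" (num_split : Int)).getD []
      let piece := split.getLastD ""          -- split[-1]; the split list is never empty
      if max < PySem.Str.len piece then truncA_loop s max (num_split+1) fuel
      else piece

def truncate_name (dirs : List String) (max : Int) : String :=
  let new_filename := PySem.Str.join "\\" dirs
  if max < PySem.Str.len new_filename then
    truncA_loop new_filename max 1 (new_filename.toList.count '\\' + 1)
  else new_filename   -- Python raises UnboundLocalError here ('split' unbound); excluded by Pre_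

-- ===== PORT B =====
def truncB_loop (parts : List String) (max : Int) : Nat → Int → String
  | k, length =>
      if h : 1 < k ∧ length + 1 + PySem.Str.len (parts.getD (k-1) "") ≤ max then
        truncB_loop parts max (k-1) (length + 1 + PySem.Str.len (parts.getD (k-1) ""))
      else PySem.Str.join "\\" (parts.drop k)   -- "\\".join(parts[k:]); drop is exact for this Nat index
  termination_by k => k

def truncate_name_alt (dirs : List String) (max : Int) : String :=
  let parts := (PySem.Str.split? (PySem.Str.join "\\" dirs) "\\").getD []
  let total := (parts.map PySem.Str.len).sum + parts.length - 1
  if total ≤ max then PySem.Str.join "\\" parts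
  else truncB_loop parts max (parts.length - 1) (PySem.Str.len (parts.getLastD ""))

-- ===== PRECONDITION & SPEC =====
-- Pre_ = exactly the inputs where Python A returns: the joined name is longer than max
-- (otherwise the loop body never runs and 'split' is unbound: UnboundLocalError), and the
-- last backslash-separated component fits (otherwise the loop never terminates).
def Pre_truncate_name (dirs : List String) (max : Int) : Prop :=
  max < PySem.Str.len (PySem.Str.join "\\" dirs) ∧
  PySem.Str.len ((((PySem.Str.split? (PySem.Str.join "\\" dirs) "\\").getD []).getLastD "")) ≤ max
instance (dirs : List String) (max : Int) : Decidable (Pre_truncate_name dirs max) := by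
  unfold Pre_truncate_name; infer_instance

def pvWitness_truncate_name : List String × Int := (["ab", "cd", "ef"], 5)

def Spec_truncate_name (dirs : List String) (max : Int) (out : String) : Prop := out = truncate_name_alt dirs max
instance (dirs : List String) (max : Int) (out : String) : Decidable (Spec_truncate_name dirs max out) := by unfold Spec_truncate_name; infer_instance

-- ===== CLAIM (what is proved, stated in full; the proofs are below) =====
def Claim_equal_truncate_name : Prop := ∀ (dirs : List String) (max : Int), Dom_truncate_name dirs max → Pre_truncate_name dirs max → Spec_truncate_name dirs max (truncate_name dirs max)

-- ===== LEMMAS AND PROOFS =====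

-- Fuel-free reference split functions (single-character separator '\').
def pvSplit : List Char → List (List Char)
  | [] => [[]]
  | x :: xs => if x = '\\' then [] :: pvSplit xs else (pvSplit xs).modifyHead (x :: ·)

def pvSplitM : Nat → List Char → List (List Char)
  | _, [] => [[]]
  | 0, x :: xs => [x :: xs]
  | m+1, x :: xs => if x = '\\' then [] :: pvSplitM m xs else (pvSplitM (m+1) xs).modifyHead (x :: ·)

def pvJoin (ps : List (List Char)) : List Char := PySem.Chars.join ['\\'] ps

theorem pvSplit_cons_sep (xs : List Char) : pvSplit ('\\' :: xs) = [] :: pvSplit xs := by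
  simp [pvSplit]

theorem pvSplit_cons_ne (x : Char) (xs : List Char) (hx : x ≠ '\\') :
    pvSplit (x :: xs) = (pvSplit xs).modifyHead (x :: ·) := by
  simp [pvSplit, hx]

theorem pvSplitM_succ_sep (m : Nat) (xs : List Char) :
    pvSplitM (m+1) ('\\' :: xs) = [] :: pvSplitM m xs := by
  simp [pvSplitM]

theorem pvSplitM_succ_ne (m : Nat) (x : Char) (xs : List Char) (hx : x ≠ '\\') :
    pvSplitM (m+1) (x :: xs) = (pvSplitM (m+1) xs).modifyHead (x :: ·) := by
  simp [pvSplitM, hx]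

theorem pvSplit_length (l : List Char) : (pvSplit l).length = l.count '\\' + 1 := by
  induction l with
  | nil => simp [pvSplit]
  | cons x xs ih =>
    simp only [pvSplit]
    split <;> simp_all

theorem pvSplit_ne_nil (l : List Char) : pvSplit l ≠ [] := by
  intro h
  have := pvSplit_length l
  rw [h] at this
  simp at this

theorem pvSplitM_ne_nil (m : Nat) (l : List Char) : pvSplitM m l ≠ [] := by
  induction l generalizing m with
  | nil => simp [pvSplitM]
  | cons x xs ih =>
    cases m with
    | zero => simp [pvSplitM]
    | succ m =>
      simp only [pvSplitM]
      split
      · simp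
      · intro h
        have := ih (m+1)
        cases hxs : pvSplitM (m+1) xs with
        | nil => exact this hxs
        | cons a t => rw [hxs] at h; simp [List.modifyHead] at h

theorem sep_toList : ("\\" : String).toList = ['\\'] := rfl

-- splitOn.go computes pvSplit
theorem splitOn_go_eq (fuel : Nat) (l cur : List Char) (acc : List (List Char))
    (h : l.length < fuel) :
    PySem.Chars.splitOn.go ['\\'] fuel l cur acc
      = acc.reverse ++ (pvSplit l).modifyHead (cur.reverse ++ ·) := by
  induction fuel generalizing l cur acc with
  | zero => omega
  | succ fuel ih =>
    cases l with
    | nil =>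
      simp [PySem.Chars.splitOn.go, pvSplit, List.modifyHead]
    | cons x rest =>
      simp only [PySem.Chars.splitOn.go]
      by_cases hx : x = '\\'
      · subst hx
        rw [if_pos (by simp [List.isPrefixOf])]
        have hlen : rest.length < fuel := by simp at h; omega
        have hd : List.drop (['\\'] : List Char).length ('\\' :: rest) = rest := rfl
        rw [hd, ih rest [] (cur.reverse :: acc) hlen]
        simp [pvSplit, List.modifyHead]
        cases pvSplit rest <;> rfl
      · rw [if_neg (by simp [List.isPrefixOf]; intro hh; exact hx hh.symm)]
        have hlen : rest.length < fuel := by simp at h; omega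
        rw [ih rest (x :: cur) acc hlen]
        obtain ⟨p, P', hP⟩ := List.exists_cons_of_ne_nil (pvSplit_ne_nil rest)
        simp [pvSplit, hP, if_neg hx, List.modifyHead]

theorem splitOn_eq (l : List Char) : PySem.Chars.splitOn l ['\\'] = pvSplit l := by
  rw [PySem.Chars.splitOn, splitOn_go_eq _ _ _ _ (by omega)]
  cases hP : pvSplit l with
  | nil => exact absurd hP (pvSplit_ne_nil l)
  | cons a t => simp [List.modifyHead]

theorem splitOnMax_go_eq (fuel : Nat) (m : Nat) (l cur : List Char) (acc : List (List Char))
    (h : l.length < fuel) :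
    PySem.Chars.splitOnMax.go ['\\'] fuel m l cur acc
      = acc.reverse ++ (pvSplitM m l).modifyHead (cur.reverse ++ ·) := by
  induction fuel generalizing m l cur acc with
  | zero => omega
  | succ fuel ih =>
    cases l with
    | nil =>
      simp [PySem.Chars.splitOnMax.go, pvSplitM, List.modifyHead]
    | cons x rest =>
      simp only [PySem.Chars.splitOnMax.go]
      cases m with
      | zero =>
        simp [pvSplitM, List.modifyHead]
      | succ m =>
        rw [if_neg (by omega)]
        by_cases hx : x = '\\'
        · subst hx
          rw [if_pos (by simp [List.isPrefixOf])]
          have hlen : rest.length < fuel := by simp at h; omega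
          have : (m + 1 - 1) = m := by omega
          have hd : List.drop (['\\'] : List Char).length ('\\' :: rest) = rest := rfl
          rw [this, hd, ih m rest [] (cur.reverse :: acc) hlen]
          simp [pvSplitM, List.modifyHead]
          cases pvSplitM m rest <;> rfl
        · rw [if_neg (by simp [List.isPrefixOf]; intro hh; exact hx hh.symm)]
          have hlen : rest.length < fuel := by simp at h; omega
          rw [ih (m+1) rest (x :: cur) acc hlen]
          obtain ⟨p, P', hP⟩ := List.exists_cons_of_ne_nil (pvSplitM_ne_nil (m+1) rest)
          simp [pvSplitM, hP, if_neg hx, List.modifyHead]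

theorem splitOnMax_eq (l : List Char) (m : Nat) :
    PySem.Chars.splitOnMax l ['\\'] (m : Int) = pvSplitM m l := by
  rw [PySem.Chars.splitOnMax, if_neg (by omega)]
  rw [splitOnMax_go_eq _ _ _ _ _ (by omega)]
  rw [Int.toNat_natCast]
  obtain ⟨a, t, hP⟩ := List.exists_cons_of_ne_nil (pvSplitM_ne_nil m l)
  rw [hP]
  simp [List.modifyHead]

theorem pvJoin_cons (p : List Char) (ps : List (List Char)) (h : ps ≠ []) :
    pvJoin (p :: ps) = p ++ '\\' :: pvJoin ps := by
  obtain ⟨q, t, rfl⟩ := List.exists_cons_of_ne_nil h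
  rw [pvJoin, PySem.Chars.join_cons_cons]
  simp [pvJoin]

theorem pvJoin_modifyHead_cons (x : Char) (ps : List (List Char)) (h : ps ≠ []) :
    pvJoin (ps.modifyHead (x :: ·)) = x :: pvJoin ps := by
  obtain ⟨p, t, rfl⟩ := List.exists_cons_of_ne_nil h
  cases t with
  | nil => simp [List.modifyHead, pvJoin, PySem.Chars.join_singleton]
  | cons q t' =>
    simp only [List.modifyHead]
    rw [pvJoin, PySem.Chars.join_cons_cons, pvJoin, PySem.Chars.join_cons_cons]
    simp

-- join ∘ split = id
theorem pvJoin_pvSplit (l : List Char) : pvJoin (pvSplit l) = l := by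
  induction l with
  | nil => simp [pvSplit, pvJoin, PySem.Chars.join_singleton]
  | cons x xs ih =>
    simp only [pvSplit]
    by_cases hx : x = '\\'
    · subst hx
      rw [if_pos rfl, pvJoin_cons _ _ (pvSplit_ne_nil xs), ih]
      simp
    · rw [if_neg hx, pvJoin_modifyHead_cons _ _ (pvSplit_ne_nil xs), ih]

theorem pvSplitM_eq_take_drop (l : List Char) (m : Nat) (h : m < (pvSplit l).length) :
    pvSplitM m l = (pvSplit l).take m ++ [pvJoin ((pvSplit l).drop m)] := by
  induction l generalizing m with
  | nil =>
    have hm : m = 0 := by simp [pvSplit] at h; omega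
    subst hm
    simp [pvSplitM, pvSplit, pvJoin, PySem.Chars.join_singleton]
  | cons x xs ih =>
    by_cases hx : x = '\\'
    · subst hx
      rw [pvSplit_cons_sep] at h ⊢
      cases m with
      | zero =>
        rw [List.take_zero, List.drop_zero, pvJoin_cons _ _ (pvSplit_ne_nil xs), pvJoin_pvSplit]
        simp [pvSplitM]
      | succ m =>
        have hm : m < (pvSplit xs).length := by simp at h; omega
        rw [pvSplitM_succ_sep, ih m hm]
        simp
    · rw [pvSplit_cons_ne x xs hx] at h ⊢
      obtain ⟨p, P', hP⟩ := List.exists_cons_of_ne_nil (pvSplit_ne_nil xs)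
      cases m with
      | zero =>
        rw [List.take_zero, List.drop_zero, pvJoin_modifyHead_cons _ _ (pvSplit_ne_nil xs), pvJoin_pvSplit]
        simp [pvSplitM]
      | succ m =>
        have hm : m + 1 < (pvSplit xs).length := by
          rwa [List.length_modifyHead] at h
        rw [pvSplitM_succ_ne m x xs hx, ih (m+1) hm, hP]
        simp [List.modifyHead]

theorem pvJoin_length (ps : List (List Char)) (h : ps ≠ []) :
    ((pvJoin ps).length : Int) = (ps.map (fun cs => ((cs.length : Nat) : Int))).sum + ps.length - 1 := by
  induction ps with
  | nil => exact absurd rfl h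
  | cons p t ih =>
    cases t with
    | nil => simp [pvJoin, PySem.Chars.join_singleton]
    | cons q t' =>
      rw [pvJoin_cons _ _ (by simp)]
      have := ih (by simp)
      simp only [List.length_append, List.length_cons, List.map_cons, List.sum_cons] at *
      push_cast at *
      omega

-- ===== string-level bridges =====

theorem splitA_parts (s : String) (ns : Nat) :
    (PySem.Str.splitMax? s "\\" (ns : Int)).getD [] = (pvSplitM ns s.toList).map String.ofList := by
  rw [PySem.Str.splitMax?]
  simp [PySem.Chars.splitMax?, sep_toList, splitOnMax_eq]

theorem splitB_parts (s : String) :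
    (PySem.Str.split? s "\\").getD [] = (pvSplit s.toList).map String.ofList := by
  simp [PySem.Str.split?, PySem.Chars.split?, sep_toList, splitOn_eq]

theorem getLastD_map_ofList (L : List (List Char)) (h : L ≠ []) :
    (L.map String.ofList).getLastD "" = String.ofList (L.getLastD []) := by
  induction L with
  | nil => exact absurd rfl h
  | cons a t ih =>
    cases t with
    | nil => simp
    | cons b t' => simpa using ih (by simp)

theorem getD_map_ofList (L : List (List Char)) (i : Nat) (h : i < L.length) :
    (L.map String.ofList).getD i "" = String.ofList (L.getD i []) := by
  rw [List.getD_eq_getElem?_getD, List.getD_eq_getElem?_getD, List.getElem?_map]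
  rw [List.getElem?_eq_getElem h]
  simp

theorem strJoin_map (X : List (List Char)) :
    PySem.Str.join "\\" (X.map String.ofList) = String.ofList (pvJoin X) := by
  rw [PySem.Str.join, pvJoin, List.map_map, sep_toList]
  have h1 : List.map (String.toList ∘ String.ofList) X = X := by
    simp [Function.comp_def]
  rw [h1]

-- suffix length, as an Int
def pvLf (s : String) (k : Nat) : Int := ((pvJoin ((pvSplit s.toList).drop k)).length : Int)

theorem pvLf_step (s : String) (k : Nat) (h1 : 0 < k) (h2 : k < (pvSplit s.toList).length) :
    pvLf s (k-1) = (((pvSplit s.toList).getD (k-1) []).length : Int) + 1 + pvLf s k := by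
  have hk1 : k - 1 < (pvSplit s.toList).length := by omega
  have hdrop : (pvSplit s.toList).drop (k-1)
      = (pvSplit s.toList).getD (k-1) [] :: (pvSplit s.toList).drop k := by
    have hidx : k - 1 + 1 = k := by omega
    rw [List.drop_eq_getElem_cons hk1, hidx, List.getD_eq_getElem _ _ hk1]
  have hne : (pvSplit s.toList).drop k ≠ [] := by
    simp [List.drop_eq_nil_iff]
    omega
  rw [pvLf, hdrop, pvJoin_cons _ _ hne]
  simp [pvLf]
  ring

theorem pvLf_mono (s : String) (j k : Nat) (hjk : j ≤ k)
    (hk : k < (pvSplit s.toList).length) : pvLf s k ≤ pvLf s j := by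
  induction k with
  | zero => interval_cases j; rfl
  | succ k ih =>
    rcases Nat.eq_or_lt_of_le hjk with rfl | hlt
    · rfl
    · have hstep : pvLf s k = (((pvSplit s.toList).getD k []).length : Int) + 1 + pvLf s (k+1) := by
        have := pvLf_step s (k+1) (by omega) hk
        simpa using this
      have h1 : pvLf s (k+1) ≤ pvLf s k := by
        rw [hstep]
        have : (0 : Int) ≤ (((pvSplit s.toList).getD k []).length : Int) := by positivity
        omega
      have h2 : pvLf s k ≤ pvLf s j := ih (by omega) (by omega)
      omega

-- A's loop returns the K-th suffix, K the least index whose suffix fits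
theorem truncA_loop_eq (s : String) (max : Int) (K : Nat)
    (hK1 : 1 ≤ K) (hKn : K < (pvSplit s.toList).length)
    (hmin : ∀ j < K, max < pvLf s j) (hfit : pvLf s K ≤ max) :
    ∀ fuel ns, 1 ≤ ns → ns ≤ K → K - ns < fuel →
      truncA_loop s max ns fuel = String.ofList (pvJoin ((pvSplit s.toList).drop K)) := by
  intro fuel
  induction fuel with
  | zero => intro ns _ _ h3; omega
  | succ fuel ih =>
    intro ns h1 h2 _
    simp only [truncA_loop]
    rw [splitA_parts, getLastD_map_ofList _ (pvSplitM_ne_nil _ _)]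
    have hns : ns < (pvSplit s.toList).length := by omega
    rw [pvSplitM_eq_take_drop _ _ hns]
    rw [List.getLastD_concat]
    have hlen : PySem.Str.len (String.ofList (pvJoin ((pvSplit s.toList).drop ns))) = pvLf s ns := by
      rw [PySem.Str.len_eq, String.toList_ofList, pvLf]
    rw [hlen]
    by_cases hns' : ns = K
    · subst hns'
      rw [if_neg (by omega)]
    · rw [if_pos (hmin ns (by omega))]
      exact ih (ns+1) (by omega) (by omega) (by omega)

-- B's loop returns the same suffix
theorem truncB_loop_eq (s : String) (max : Int) (K : Nat)
    (hK1 : 1 ≤ K) (hKn : K < (pvSplit s.toList).length)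
    (hmin : ∀ j < K, max < pvLf s j) (hfit : pvLf s K ≤ max) :
    ∀ k, K ≤ k → k < (pvSplit s.toList).length →
      truncB_loop ((pvSplit s.toList).map String.ofList) max k (pvLf s k)
        = String.ofList (pvJoin ((pvSplit s.toList).drop K)) := by
  intro k
  induction k using Nat.strong_induction_on with
  | _ k ih =>
    intro hKk hkn
    rw [truncB_loop]
    have hgetD : ∀ (hk : 0 < k), ((pvSplit s.toList).map String.ofList).getD (k-1) ""
        = String.ofList ((pvSplit s.toList).getD (k-1) []) := fun hk =>
      getD_map_ofList _ _ (by omega)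
    by_cases hKlt : K < k
    · have hk0 : 0 < k := by omega
      have hcond : 1 < k ∧ pvLf s k + 1 + PySem.Str.len (((pvSplit s.toList).map String.ofList).getD (k-1) "") ≤ max := by
        constructor
        · omega
        · rw [hgetD hk0, PySem.Str.len_eq, String.toList_ofList]
          have hstep := pvLf_step s k hk0 hkn
          have hfitk1 : pvLf s (k-1) ≤ max := by
            have := pvLf_mono s K (k-1) (by omega) (by omega)
            omega
          omega
      rw [dif_pos hcond]
      have hacc : pvLf s k + 1 + PySem.Str.len (((pvSplit s.toList).map String.ofList).getD (k-1) "")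
          = pvLf s (k-1) := by
        rw [hgetD (by omega), PySem.Str.len_eq, String.toList_ofList]
        have := pvLf_step s k (by omega) hkn
        omega
      rw [hacc]
      exact ih (k-1) (by omega) (by omega) (by omega)
    · have hkK : k = K := by omega
      subst hkK
      have hcond : ¬ (1 < k ∧ pvLf s k + 1 + PySem.Str.len (((pvSplit s.toList).map String.ofList).getD (k-1) "") ≤ max) := by
        rintro ⟨hk1', hle⟩
        rw [hgetD (by omega), PySem.Str.len_eq, String.toList_ofList] at hle
        have hstep := pvLf_step s k (by omega) hkn
        have := hmin (k-1) (by omega)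
        omega
      rw [dif_neg hcond]
      rw [← List.map_drop]
      exact strJoin_map _

theorem total_eq_pvLf_zero (s : String) :
    ((((pvSplit s.toList).map String.ofList).map PySem.Str.len).sum
        + ((pvSplit s.toList).map String.ofList).length - 1) = pvLf s 0 := by
  rw [pvLf, List.drop_zero, pvJoin_length _ (pvSplit_ne_nil _), List.map_map, List.length_map]
  have h1 : (PySem.Str.len ∘ String.ofList) = fun cs : List Char => ((cs.length : Nat) : Int) := by
    funext cs
    simp [PySem.Str.len_eq]
  rw [h1]

theorem pvLf_last (s : String) :
    pvLf s ((pvSplit s.toList).length - 1)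
      = PySem.Str.len (String.ofList ((pvSplit s.toList).getLastD [])) := by
  have hne := pvSplit_ne_nil s.toList
  rw [pvLf, List.drop_length_sub_one hne, PySem.Str.len_eq, String.toList_ofList]
  rw [pvJoin, PySem.Chars.join_singleton]
  congr 1
  rw [List.getLastD_eq_getLast?, List.getLast?_eq_getLast_of_ne_nil hne]
  simp

-- ===== VERDICT (by name: the statement is the Claim_ definition above) =====
theorem truncate_name_spec : Claim_equal_truncate_name := by
  intro dirs max _ hpre
  unfold Spec_truncate_name
  obtain ⟨hlong, hlast⟩ := hpre
  set s := PySem.Str.join "\\" dirs with hs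
  have hL0 : pvLf s 0 = PySem.Str.len s := by
    rw [pvLf, List.drop_zero, pvJoin_pvSplit, PySem.Str.len_eq]
  have hnotfit0 : max < pvLf s 0 := by rw [hL0]; exact hlong
  -- the last component fits
  have hlast' : pvLf s ((pvSplit s.toList).length - 1) ≤ max := by
    rw [pvLf_last]
    rw [splitB_parts, getLastD_map_ofList _ (pvSplit_ne_nil _)] at hlast
    exact hlast
  have hn1 : 1 ≤ (pvSplit s.toList).length := List.length_pos_of_ne_nil (pvSplit_ne_nil _)
  have hn2 : 2 ≤ (pvSplit s.toList).length := by
    by_contra hcon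
    have : (pvSplit s.toList).length - 1 = 0 := by omega
    rw [this] at hlast'
    omega
  -- least fitting suffix index
  have hex : ∃ k, pvLf s k ≤ max := ⟨_, hlast'⟩
  set K := Nat.find hex with hK
  have hfit : pvLf s K ≤ max := Nat.find_spec hex
  have hmin : ∀ j < K, max < pvLf s j := fun j hj => by
    have := Nat.find_min hex hj
    omega
  have hK1 : 1 ≤ K := by
    rcases Nat.eq_zero_or_pos K with h0 | h1
    · rw [h0] at hfit; omega
    · exact h1
  have hKn : K < (pvSplit s.toList).length := by
    have : K ≤ (pvSplit s.toList).length - 1 := Nat.find_min' hex hlast'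
    omega
  -- A's side
  have hA : truncate_name dirs max = String.ofList (pvJoin ((pvSplit s.toList).drop K)) := by
    rw [truncate_name]
    simp only [← hs]
    rw [if_pos hlong]
    have hfuel : s.toList.count '\\' + 1 = (pvSplit s.toList).length := by
      rw [pvSplit_length]
    rw [hfuel]
    exact truncA_loop_eq s max K hK1 hKn hmin hfit _ 1 le_rfl hK1 (by omega)
  -- B's side
  have hB : truncate_name_alt dirs max = String.ofList (pvJoin ((pvSplit s.toList).drop K)) := by
    rw [truncate_name_alt]
    simp only [← hs]
    rw [splitB_parts]
    rw [if_neg (by rw [total_eq_pvLf_zero]; omega)]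
    rw [getLastD_map_ofList _ (pvSplit_ne_nil _), List.length_map]
    have hacc : PySem.Str.len (String.ofList ((pvSplit s.toList).getLastD [])) 
        = pvLf s ((pvSplit s.toList).length - 1) := (pvLf_last s).symm
    rw [hacc]
    exact truncB_loop_eq s max K hK1 hKn hmin hfit _ (by omega) (by omega)
  rw [hA, hB]
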